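-- pv_equiv track=rewrite | github.com/RiemanNClav/chatbot_cafeteria | chatbot/mensajes2.py | generar_ticket_en_memoria
-- ===== SOURCE A (Python) =====
-- def generar_ticket_en_memoria(ticket_data, ticket_bebidas, forma_pago, total):
--     """Genera el contenido del ticket como un archivo de texto en memoria."""
--     contenido = []
--
--     # Encabezado del ticket
--     contenido.append("                  Tory Cafe")
--     contenido.append("   Poniente 128 #505, Col. Industrial Vallejo,")
--     contenido.append("          Alcaldia Azcapotzalco, CDMX")
--     contenido.append("-------------------------------------")
--
--
--     # Agregar datos generales del ticket
--     for key, value in ticket_data.items():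
--         contenido.append(f"{key} = {value}")
--     contenido.append("-------------------------------------")
--
--     # Clasificar los registros por tipo de producto
--     registros_bebidas = [t for t in ticket_bebidas if t['producto'] == 'bebidas']
--     registros_alimentos = [t for t in ticket_bebidas if t['producto'] == 'alimentos']
--     registros_promociones = [t for t in ticket_bebidas if t['producto'] == 'promociones']
--
--     # Agregar registros clasificados
--     def agregar_registro(contenido, titulo, registros):
--         if registros:
--             contenido.append(f"           {titulo}")
--             for i, ticket in enumerate(registros, start=1):
--                 contenido.append(f"      {titulo[:-1]} {i}")
--                 for key, value in ticket.items():
--                     contenido.append(f"{key} = {value}")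
--             contenido.append("-------------------------------------")
--         else:
--             contenido.append(f"       No hay {titulo[:-1].lower()}s")
--             contenido.append("-------------------------------------")
--
--     agregar_registro(contenido, "Registro de Bebidas", registros_bebidas)
--     agregar_registro(contenido, "Registro de Alimentos", registros_alimentos)
--     agregar_registro(contenido, "Registro de Promociones", registros_promociones)
--
--     contenido.append(f"TOTAL = {total} MXN")
--     contenido.append("-----------------------------------------------")
--     contenido.append(f"          Forma de pago: {forma_pago}")
--     contenido.append(f"          Vendedor: Tory Cafe")
--     contenido.append(f"          Mesero: Tory Cafe")
--     contenido.append(f"          Gracias por su compra!")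
--     contenido.append(f"          No hay devoluciones")
--
--     return "\n".join(contenido)
-- ===== SOURCE B (Python) =====
-- SEP = "-------------------------------------"
--
-- CATEGORIAS = [
--     ("bebidas", "Registro de Bebidas", "Registro de Bebida"),
--     ("alimentos", "Registro de Alimentos", "Registro de Alimento"),
--     ("promociones", "Registro de Promociones", "Registro de Promocione"),
-- ]
--
--
-- def generar_ticket_en_memoria(ticket_data, ticket_bebidas, forma_pago, total):
--     """Genera el ticket en un solo recorrido de clasificacion, con emision guiada por tabla."""
--     # one grouping pass instead of three filter scans
--     grupos = {key: [] for key, _, _ in CATEGORIAS}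
--     for t in ticket_bebidas:
--         destino = grupos.get(t['producto'])
--         if destino is not None:
--             destino.append(t)
--
--     lines = [
--         "                  Tory Cafe",
--         "   Poniente 128 #505, Col. Industrial Vallejo,",
--         "          Alcaldia Azcapotzalco, CDMX",
--         SEP,
--     ]
--     lines += [f"{k} = {v}" for k, v in ticket_data.items()]
--     lines.append(SEP)
--
--     for key, titulo, singular in CATEGORIAS:
--         regs = grupos[key]
--         if regs:
--             lines.append(f"           {titulo}")
--             for i, t in enumerate(regs, 1):
--                 lines.append(f"      {singular} {i}")
--                 lines.extend(f"{k} = {v}" for k, v in t.items())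
--         else:
--             lines.append(f"       No hay {singular.lower()}s")
--         lines.append(SEP)
--
--     lines.append(f"TOTAL = {total} MXN")
--     lines.append("-----------------------------------------------")
--     lines.append(f"          Forma de pago: {forma_pago}")
--     lines.append("          Vendedor: Tory Cafe")
--     lines.append("          Mesero: Tory Cafe")
--     lines.append("          Gracias por su compra!")
--     lines.append("          No hay devoluciones")
--
--     return "\n".join(lines)
-- ===== Notes on version B (the rewrite author's own statement) =====
-- stated objective: alternative
-- what changed: Replaces A's three separate filter scans over ticket_bebidas with a single grouping pass into a dict of per-category lists, then emits the sections with a table-driven loop over (key, titulo, singular) instead of three helper calls with sliced titles.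
import Mathlib
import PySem

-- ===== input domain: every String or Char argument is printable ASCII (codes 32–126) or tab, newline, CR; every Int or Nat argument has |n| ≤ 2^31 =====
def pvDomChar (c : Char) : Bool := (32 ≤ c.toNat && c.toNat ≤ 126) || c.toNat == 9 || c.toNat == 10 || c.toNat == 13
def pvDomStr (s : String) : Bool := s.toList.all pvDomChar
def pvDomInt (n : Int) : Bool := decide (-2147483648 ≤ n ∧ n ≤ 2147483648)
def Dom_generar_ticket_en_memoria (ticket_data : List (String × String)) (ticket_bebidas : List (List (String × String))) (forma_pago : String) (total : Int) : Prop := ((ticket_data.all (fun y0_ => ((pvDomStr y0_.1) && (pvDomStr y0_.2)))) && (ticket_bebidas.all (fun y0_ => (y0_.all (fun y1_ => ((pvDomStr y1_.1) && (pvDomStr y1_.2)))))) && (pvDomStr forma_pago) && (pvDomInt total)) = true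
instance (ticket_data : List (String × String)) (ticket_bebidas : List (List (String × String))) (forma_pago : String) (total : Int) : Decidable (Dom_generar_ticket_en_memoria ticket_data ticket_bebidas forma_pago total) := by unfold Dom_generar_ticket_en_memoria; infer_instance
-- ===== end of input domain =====

-- B replaces A's three repeated filter scans over ticket_bebidas with one grouping pass into a
-- dict of per-category lists, followed by a table-driven emit loop (objective: alternative).

-- ===== PORT A =====
def pvSep : String := "-------------------------------------"

-- t['producto'] on the assoc-list dict: first match (raises KeyError when absent — excluded by Pre_)
def pvProducto (t : List (String × String)) : Option String := t.lookup "producto"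

-- A's helper agregar_registro (mutates contenido in Python; returns the new list here)
def pvAgregarRegistro (contenido : List String) (titulo : String) (registros : List (List (String × String))) : List String :=
  if registros ≠ [] then
    (contenido ++ ["           " ++ titulo] ++
      (PySem.List.enumerate registros 1).flatMap (fun it =>
        ("      " ++ PySem.Str.slice titulo none (some (-1)) ++ " " ++ PySem.Int.toStr it.1)
          :: it.2.map (fun kv => kv.1 ++ " = " ++ kv.2))) ++ [pvSep]
  else
    contenido ++ ["       No hay " ++ PySem.Str.lower (PySem.Str.slice titulo none (some (-1))) ++ "s", pvSep]

def generar_ticket_en_memoria (ticket_data : List (String × String)) (ticket_bebidas : List (List (String × String))) (forma_pago : String) (total : Int) : String :=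
  let contenido : List String :=
    ["                  Tory Cafe",
     "   Poniente 128 #505, Col. Industrial Vallejo,",
     "          Alcaldia Azcapotzalco, CDMX",
     pvSep]
  let contenido := contenido ++ ticket_data.map (fun kv => kv.1 ++ " = " ++ kv.2) ++ [pvSep]
  let registros_bebidas := ticket_bebidas.filter (fun t => pvProducto t == some "bebidas")
  let registros_alimentos := ticket_bebidas.filter (fun t => pvProducto t == some "alimentos")
  let registros_promociones := ticket_bebidas.filter (fun t => pvProducto t == some "promociones")
  let contenido := pvAgregarRegistro contenido "Registro de Bebidas" registros_bebidas
  let contenido := pvAgregarRegistro contenido "Registro de Alimentos" registros_alimentos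
  let contenido := pvAgregarRegistro contenido "Registro de Promociones" registros_promociones
  let contenido := contenido ++
    ["TOTAL = " ++ PySem.Int.toStr total ++ " MXN",
     "-----------------------------------------------",
     "          Forma de pago: " ++ forma_pago,
     "          Vendedor: Tory Cafe",
     "          Mesero: Tory Cafe",
     "          Gracias por su compra!",
     "          No hay devoluciones"]
  PySem.Str.join "\n" contenido

-- ===== PORT B =====
-- Source B's grouping dict {'bebidas': [], 'alimentos': [], 'promociones': []} as a triple of lists
def pvPaso (gs : List (List (String × String)) × List (List (String × String)) × List (List (String × String)))
    (t : List (String × String)) :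
    List (List (String × String)) × List (List (String × String)) × List (List (String × String)) :=
  let p := t.lookup "producto"
  if p == some "bebidas" then (gs.1 ++ [t], gs.2.1, gs.2.2)
  else if p == some "alimentos" then (gs.1, gs.2.1 ++ [t], gs.2.2)
  else if p == some "promociones" then (gs.1, gs.2.1, gs.2.2 ++ [t])
  else gs

def pvAgrupar (ticket_bebidas : List (List (String × String))) :
    List (List (String × String)) × List (List (String × String)) × List (List (String × String)) :=
  ticket_bebidas.foldl pvPaso ([], [], [])

-- one step of Source B's table-driven emit loop: (titulo, singular, regs)
def pvEmit (lines : List String) (c : String × String × List (List (String × String))) : List String :=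
  (if c.2.2 ≠ [] then
    lines ++ ["           " ++ c.1] ++
      (PySem.List.enumerate c.2.2 1).flatMap (fun it =>
        ("      " ++ c.2.1 ++ " " ++ PySem.Int.toStr it.1)
          :: it.2.map (fun kv => kv.1 ++ " = " ++ kv.2))
  else
    lines ++ ["       No hay " ++ PySem.Str.lower c.2.1 ++ "s"]) ++ [pvSep]

def generar_ticket_en_memoria_alt (ticket_data : List (String × String)) (ticket_bebidas : List (List (String × String))) (forma_pago : String) (total : Int) : String :=
  let gs := pvAgrupar ticket_bebidas
  let lines : List String :=
    ["                  Tory Cafe",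
     "   Poniente 128 #505, Col. Industrial Vallejo,",
     "          Alcaldia Azcapotzalco, CDMX",
     pvSep]
  let lines := lines ++ ticket_data.map (fun kv => kv.1 ++ " = " ++ kv.2) ++ [pvSep]
  let lines := [("Registro de Bebidas", "Registro de Bebida", gs.1),
                ("Registro de Alimentos", "Registro de Alimento", gs.2.1),
                ("Registro de Promociones", "Registro de Promocione", gs.2.2)].foldl pvEmit lines
  let lines := lines ++
    ["TOTAL = " ++ PySem.Int.toStr total ++ " MXN",
     "-----------------------------------------------",
     "          Forma de pago: " ++ forma_pago,
     "          Vendedor: Tory Cafe",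
     "          Mesero: Tory Cafe",
     "          Gracias por su compra!",
     "          No hay devoluciones"]
  PySem.Str.join "\n" lines

-- ===== PRECONDITION & SPEC =====
-- Pre_ excludes exactly the inputs where some record lacks a 'producto' key: there Python A
-- (and Python B) raise KeyError instead of returning.
def Pre_generar_ticket_en_memoria (ticket_data : List (String × String)) (ticket_bebidas : List (List (String × String))) (forma_pago : String) (total : Int) : Prop :=
  ticket_bebidas.all (fun t => t.any (fun kv => kv.1 == "producto")) = true
instance (ticket_data : List (String × String)) (ticket_bebidas : List (List (String × String))) (forma_pago : String) (total : Int) : Decidable (Pre_generar_ticket_en_memoria ticket_data ticket_bebidas forma_pago total) := by unfold Pre_generar_ticket_en_memoria; infer_instance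

def pvWitness_generar_ticket_en_memoria : (List (String × String)) × (List (List (String × String))) × String × Int :=
  ([("Folio", "1")], [[("producto", "bebidas"), ("nombre", "cafe")]], "efectivo", 50)

def Spec_generar_ticket_en_memoria (ticket_data : List (String × String)) (ticket_bebidas : List (List (String × String))) (forma_pago : String) (total : Int) (out : String) : Prop := out = generar_ticket_en_memoria_alt ticket_data ticket_bebidas forma_pago total
instance (ticket_data : List (String × String)) (ticket_bebidas : List (List (String × String))) (forma_pago : String) (total : Int) (out : String) : Decidable (Spec_generar_ticket_en_memoria ticket_data ticket_bebidas forma_pago total out) := by unfold Spec_generar_ticket_en_memoria; infer_instance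

-- ===== CLAIM (what is proved, stated in full; the proofs are below) =====
def Claim_equal_generar_ticket_en_memoria : Prop := ∀ (ticket_data : List (String × String)) (ticket_bebidas : List (List (String × String))) (forma_pago : String) (total : Int), Dom_generar_ticket_en_memoria ticket_data ticket_bebidas forma_pago total → Pre_generar_ticket_en_memoria ticket_data ticket_bebidas forma_pago total → Spec_generar_ticket_en_memoria ticket_data ticket_bebidas forma_pago total (generar_ticket_en_memoria ticket_data ticket_bebidas forma_pago total)

-- ===== LEMMAS AND PROOFS =====

-- the grouping fold is the three filters, run in one pass
lemma pvAgrupar_eq (l : List (List (String × String))) :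
    pvAgrupar l = (l.filter (fun t => pvProducto t == some "bebidas"),
                   l.filter (fun t => pvProducto t == some "alimentos"),
                   l.filter (fun t => pvProducto t == some "promociones")) := by
  unfold pvAgrupar
  suffices h : ∀ (b a p : List (List (String × String))),
      l.foldl pvPaso (b, a, p) =
      (b ++ l.filter (fun t => pvProducto t == some "bebidas"),
       a ++ l.filter (fun t => pvProducto t == some "alimentos"),
       p ++ l.filter (fun t => pvProducto t == some "promociones")) by
    simpa using h [] [] []
  induction l with
  | nil => intro b a p; simp
  | cons t l ih =>
    intro b a p
    simp only [List.foldl_cons, List.filter_cons, pvProducto]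
    by_cases h1 : (t.lookup "producto" == some "bebidas") = true
    · have hstep : pvPaso (b, a, p) t = (b ++ [t], a, p) := by simp [pvPaso, h1]
      have he := eq_of_beq h1
      have h2 : (t.lookup "producto" == some "alimentos") = false := by simp [he]
      have h3 : (t.lookup "producto" == some "promociones") = false := by simp [he]
      rw [hstep, ih]
      simp [pvProducto, h1, h2, h3]
    · by_cases h2 : (t.lookup "producto" == some "alimentos") = true
      · have hstep : pvPaso (b, a, p) t = (b, a ++ [t], p) := by simp [pvPaso, h1, h2]
        have he := eq_of_beq h2
        have h3 : (t.lookup "producto" == some "promociones") = false := by simp [he]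
        rw [hstep, ih]
        simp [pvProducto, h1, h2, h3]
      · by_cases h3 : (t.lookup "producto" == some "promociones") = true
        · have hstep : pvPaso (b, a, p) t = (b, a, p ++ [t]) := by simp [pvPaso, h1, h2, h3]
          rw [hstep, ih]
          simp [pvProducto, h1, h2, h3]
        · have hstep : pvPaso (b, a, p) t = (b, a, p) := by simp [pvPaso, h1, h2, h3]
          rw [hstep, ih]
          simp [pvProducto, h1, h2, h3]

-- A's helper agrees with one emit step once the singular form is the titulo without its last letter
lemma pvAgregar_eq_emit (contenido : List String) (titulo singular : String)
    (registros : List (List (String × String)))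
    (h : PySem.Str.slice titulo none (some (-1)) = singular) :
    pvAgregarRegistro contenido titulo registros = pvEmit contenido (titulo, singular, registros) := by
  unfold pvAgregarRegistro pvEmit
  by_cases hr : registros ≠ []
  · simp [hr, h]
  · simp [hr, h, pvSep]

-- ===== VERDICT (by name: the statement is the Claim_ definition above) =====
theorem generar_ticket_en_memoria_spec : Claim_equal_generar_ticket_en_memoria := by
  intro ticket_data ticket_bebidas forma_pago total _ _
  unfold Spec_generar_ticket_en_memoria generar_ticket_en_memoria generar_ticket_en_memoria_alt
  have heb : ∀ c r, pvAgregarRegistro c "Registro de Bebidas" r =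
      pvEmit c ("Registro de Bebidas", "Registro de Bebida", r) :=
    fun c r => pvAgregar_eq_emit c _ _ r (by decide)
  have hea : ∀ c r, pvAgregarRegistro c "Registro de Alimentos" r =
      pvEmit c ("Registro de Alimentos", "Registro de Alimento", r) :=
    fun c r => pvAgregar_eq_emit c _ _ r (by decide)
  have hep : ∀ c r, pvAgregarRegistro c "Registro de Promociones" r =
      pvEmit c ("Registro de Promociones", "Registro de Promocione", r) :=
    fun c r => pvAgregar_eq_emit c _ _ r (by decide)
  simp only [pvAgrupar_eq, heb, hea, hep, List.foldl_cons, List.foldl_nil]
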